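-- pv_equiv track=rewrite | github.com/leedongkyu0407/codetree-TILs | 240321/숫자 카운트/numeric-count.py | possible_num
-- ===== SOURCE A (Python) =====
-- def possible_num(a, b, c, strike, ball, prev_list):
--     possible_list = []
--     str_cnt, ball_cnt = 0, 0
--     for i in range(1, 10):
--         for j in range(1, 10):
--             for k in range(1, 10):
--                 #조건 1 : 서로 다른 숫자 세 개
--                 if i != j and j != k and k != i:
--                     if i == a:
--                         str_cnt += 1
--                     if j==b:
--                         str_cnt += 1
--                     if k==c:
--                         str_cnt += 1
--
--                     if j==a or j==c:
--                         ball_cnt += 1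
--                     if i==b or i==c:
--                         ball_cnt += 1
--                     if k==a or k==b:
--                         ball_cnt += 1
--
--                     #횟수에 따라 가짓수를 줄여가기 위해 prev_list 사용
--                     if str_cnt == strike and ball_cnt == ball:
--                         if len(prev_list) == 0 or [i, j, k] in prev_list:
--                             possible_list.append([i,j,k])
--                 str_cnt, ball_cnt = 0, 0
--     return possible_list
-- ===== SOURCE B (Python) =====
-- def possible_num(a, b, c, strike, ball, prev_list):
--     def perms(pool, r):
--         # all r-length permutations of pool, in the same lexicographic order
--         # (w.r.t. pool order) that nested distinct loops would produce
--         if r == 0: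
--             return [[]]
--         return [[x] + rest
--                 for idx, x in enumerate(pool)
--                 for rest in perms(pool[:idx] + pool[idx + 1:], r - 1)]
--
--     out = []
--     for i, j, k in perms(list(range(1, 10)), 3):
--         s = (i == a) + (j == b) + (k == c)
--         bl = (j == a or j == c) + (i == b or i == c) + (k == a or k == b)
--         if s == strike and bl == ball and (len(prev_list) == 0 or [i, j, k] in prev_list):
--             out.append([i, j, k])
--     return out
-- ===== Notes on version B (the rewrite author's own statement) =====
-- stated objective: alternative
-- what changed: Replaced the three nested 1..9 loops with if-guard and sequential counter increments by a recursive permutation generator (lexicographic 3-permutations of 1..9, so the distinctness guard disappears) and per-candidate boolean-sum strike/ball counts.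
import Mathlib
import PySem

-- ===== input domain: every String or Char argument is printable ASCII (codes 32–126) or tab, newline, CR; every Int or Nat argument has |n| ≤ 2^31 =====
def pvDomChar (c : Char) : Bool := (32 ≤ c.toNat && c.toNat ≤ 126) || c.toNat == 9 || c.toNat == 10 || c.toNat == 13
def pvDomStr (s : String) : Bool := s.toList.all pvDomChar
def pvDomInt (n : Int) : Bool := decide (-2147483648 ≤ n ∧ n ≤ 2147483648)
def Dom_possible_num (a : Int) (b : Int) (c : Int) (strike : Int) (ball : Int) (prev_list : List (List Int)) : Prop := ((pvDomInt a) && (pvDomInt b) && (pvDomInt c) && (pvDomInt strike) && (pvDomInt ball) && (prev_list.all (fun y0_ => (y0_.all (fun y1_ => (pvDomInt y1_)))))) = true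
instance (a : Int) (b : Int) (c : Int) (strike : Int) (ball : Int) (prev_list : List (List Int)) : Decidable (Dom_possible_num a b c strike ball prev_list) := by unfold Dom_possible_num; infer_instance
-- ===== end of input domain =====

-- B replaces A's three nested 1..9 loops with distinctness guard by a recursive
-- permutation generator (same lexicographic order) and boolean-sum counts;
-- objective: idiomatic/alternative decomposition, same cost.

-- ===== PORT A =====
def possible_num (a : Int) (b : Int) (c : Int) (strike : Int) (ball : Int) (prev_list : List (List Int)) : List (List Int) :=
  (PySem.List.pyRange 1 10 1).foldl (fun pl1 i =>
    (PySem.List.pyRange 1 10 1).foldl (fun pl2 j =>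
      (PySem.List.pyRange 1 10 1).foldl (fun pl3 k =>
        if i ≠ j ∧ j ≠ k ∧ k ≠ i then
          let sc0 : Int := 0
          let bc0 : Int := 0
          let sc1 := if i = a then sc0 + 1 else sc0
          let sc2 := if j = b then sc1 + 1 else sc1
          let sc3 := if k = c then sc2 + 1 else sc2
          let bc1 := if j = a ∨ j = c then bc0 + 1 else bc0
          let bc2 := if i = b ∨ i = c then bc1 + 1 else bc1
          let bc3 := if k = a ∨ k = b then bc2 + 1 else bc2
          if sc3 = strike ∧ bc3 = ball then
            if prev_list.length = 0 ∨ [i, j, k] ∈ prev_list then pl3 ++ [[i, j, k]]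
            else pl3
          else pl3
        else pl3) pl2) pl1) []

-- ===== PORT B =====
-- recursive permutation generator: perms(pool, r) of Source B
-- (pool[:idx] / pool[idx+1:] ported with PySem.List.slice — exact)
def pvPerms : List Int → Nat → List (List Int)
  | _, 0 => [[]]
  | pool, r + 1 =>
    (PySem.List.enumerate pool).flatMap (fun p =>
      (pvPerms (PySem.List.slice pool none (some p.1) ++
                PySem.List.slice pool (some (p.1 + 1)) none) r).map (fun rest => [p.2] ++ rest))

def possible_num_alt (a : Int) (b : Int) (c : Int) (strike : Int) (ball : Int) (prev_list : List (List Int)) : List (List Int) :=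
  (pvPerms (PySem.List.pyRange 1 10 1) 3).foldl (fun out t =>
    match t with
    | [i, j, k] =>
      let s : Int := (if i = a then 1 else 0) + (if j = b then 1 else 0) + (if k = c then 1 else 0)
      let bl : Int := (if j = a ∨ j = c then 1 else 0) + (if i = b ∨ i = c then 1 else 0) +
                      (if k = a ∨ k = b then 1 else 0)
      if s = strike ∧ bl = ball ∧ (prev_list.length = 0 ∨ [i, j, k] ∈ prev_list) then
        out ++ [[i, j, k]]
      else out
    | _ => out) []

-- ===== PRECONDITION & SPEC =====
def Spec_possible_num (a : Int) (b : Int) (c : Int) (strike : Int) (ball : Int) (prev_list : List (List Int)) (out : List (List Int)) : Prop := out = possible_num_alt a b c strike ball prev_list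
instance (a : Int) (b : Int) (c : Int) (strike : Int) (ball : Int) (prev_list : List (List Int)) (out : List (List Int)) : Decidable (Spec_possible_num a b c strike ball prev_list out) := by unfold Spec_possible_num; infer_instance

-- ===== CLAIM (what is proved, stated in full; the proofs are below) =====
def Claim_equal_possible_num : Prop := ∀ (a : Int) (b : Int) (c : Int) (strike : Int) (ball : Int) (prev_list : List (List Int)), Dom_possible_num a b c strike ball prev_list → Spec_possible_num a b c strike ball prev_list (possible_num a b c strike ball prev_list)

-- ===== LEMMAS AND PROOFS =====

-- A's per-triple body, acc-free (what one iteration appends)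
def pvBodyA (a b c strike ball : Int) (prev_list : List (List Int)) (i j k : Int) : List (List Int) :=
  if i ≠ j ∧ j ≠ k ∧ k ≠ i then
    let sc0 : Int := 0
    let bc0 : Int := 0
    let sc1 := if i = a then sc0 + 1 else sc0
    let sc2 := if j = b then sc1 + 1 else sc1
    let sc3 := if k = c then sc2 + 1 else sc2
    let bc1 := if j = a ∨ j = c then bc0 + 1 else bc0
    let bc2 := if i = b ∨ i = c then bc1 + 1 else bc1
    let bc3 := if k = a ∨ k = b then bc2 + 1 else bc2
    if sc3 = strike ∧ bc3 = ball then
      if prev_list.length = 0 ∨ [i, j, k] ∈ prev_list then [[i, j, k]] else []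
    else []
  else []

-- B's per-triple body, acc-free
def pvGB (a b c strike ball : Int) (prev_list : List (List Int)) (t : List Int) : List (List Int) :=
  match t with
  | [i, j, k] =>
    let s : Int := (if i = a then 1 else 0) + (if j = b then 1 else 0) + (if k = c then 1 else 0)
    let bl : Int := (if j = a ∨ j = c then 1 else 0) + (if i = b ∨ i = c then 1 else 0) +
                    (if k = a ∨ k = b then 1 else 0)
    if s = strike ∧ bl = ball ∧ (prev_list.length = 0 ∨ [i, j, k] ∈ prev_list) then [[i, j, k]]
    else []
  | _ => []

-- 'conditionally append' folds are flatMaps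
theorem pv_foldl_eq_flatMap {α β : Type} (F : List β → α → List β) (g : α → List β)
    (h : ∀ acc x, F acc x = acc ++ g x) :
    ∀ (l : List α) (acc : List β), l.foldl F acc = acc ++ l.flatMap g := by
  intro l
  induction l with
  | nil => intro acc; simp
  | cons x t ih => intro acc; simp [List.foldl_cons, h, ih, List.append_assoc]

theorem pv_flatMap_if_singleton {c : Prop} [Decidable c] (x : List Int)
    (H : List Int → List (List Int)) :
    (if c then [x] else ([] : List (List Int))).flatMap H = if c then H x else [] := by
  split_ifs <;> simp

-- pull an arbitrary per-triple body through the guarded triple enumeration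
theorem pv_pull (xs : List Int) (H : List Int → List (List Int)) :
    (xs.flatMap fun i => xs.flatMap fun j => xs.flatMap fun k =>
        if i ≠ j ∧ j ≠ k ∧ k ≠ i then H [i, j, k] else []) =
      (xs.flatMap fun i => xs.flatMap fun j => xs.flatMap fun k =>
        if i ≠ j ∧ j ≠ k ∧ k ≠ i then [[i, j, k]] else []).flatMap H := by
  simp only [List.flatMap_assoc, pv_flatMap_if_singleton]

set_option maxRecDepth 4000 in
theorem pv_range_eq : PySem.List.pyRange 1 10 1 = [1, 2, 3, 4, 5, 6, 7, 8, 9] := by decide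

-- the recursive generator produces exactly the guard-filtered triples, in order
set_option maxRecDepth 4000 in
set_option maxHeartbeats 1000000 in
theorem pv_perms_eq :
    pvPerms [1, 2, 3, 4, 5, 6, 7, 8, 9] 3 =
      ([1, 2, 3, 4, 5, 6, 7, 8, 9].flatMap fun i =>
        [1, 2, 3, 4, 5, 6, 7, 8, 9].flatMap fun j =>
          [1, 2, 3, 4, 5, 6, 7, 8, 9].flatMap fun k =>
            if i ≠ j ∧ j ≠ k ∧ k ≠ i then [[i, j, k]] else []) := by decide

-- A's body equals the distinctness guard applied to B's body
set_option maxHeartbeats 2000000 in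
theorem pv_body_eq (a b c strike ball : Int) (prev_list : List (List Int)) (i j k : Int) :
    pvBodyA a b c strike ball prev_list i j k =
      (if i ≠ j ∧ j ≠ k ∧ k ≠ i then pvGB a b c strike ball prev_list [i, j, k] else []) := by
  unfold pvBodyA pvGB
  dsimp only
  have hs : (if k = c then (if j = b then (if i = a then (0:Int) + 1 else 0) + 1
                  else if i = a then (0:Int) + 1 else 0) + 1
              else if j = b then (if i = a then (0:Int) + 1 else 0) + 1
                  else if i = a then (0:Int) + 1 else 0) =
      (if i = a then (1:Int) else 0) + (if j = b then 1 else 0) + (if k = c then 1 else 0) := by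
    split_ifs <;> omega
  have hb : (if k = a ∨ k = b then (if i = b ∨ i = c then (if j = a ∨ j = c then (0:Int) + 1 else 0) + 1
                  else if j = a ∨ j = c then (0:Int) + 1 else 0) + 1
              else if i = b ∨ i = c then (if j = a ∨ j = c then (0:Int) + 1 else 0) + 1
                  else if j = a ∨ j = c then (0:Int) + 1 else 0) =
      (if j = a ∨ j = c then (1:Int) else 0) + (if i = b ∨ i = c then 1 else 0) +
        (if k = a ∨ k = b then 1 else 0) := by
    split_ifs <;> omega
  rw [hs, hb]
  split_ifs <;> first | rfl | tauto

theorem pv_A_flat (a b c strike ball : Int) (prev_list : List (List Int)) :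
    possible_num a b c strike ball prev_list =
      (PySem.List.pyRange 1 10 1).flatMap fun i =>
        (PySem.List.pyRange 1 10 1).flatMap fun j =>
          (PySem.List.pyRange 1 10 1).flatMap fun k =>
            pvBodyA a b c strike ball prev_list i j k := by
  have h3 : ∀ (i j : Int) (acc : List (List Int)) (k : Int),
      (if i ≠ j ∧ j ≠ k ∧ k ≠ i then
        let sc0 : Int := 0
        let bc0 : Int := 0
        let sc1 := if i = a then sc0 + 1 else sc0
        let sc2 := if j = b then sc1 + 1 else sc1
        let sc3 := if k = c then sc2 + 1 else sc2
        let bc1 := if j = a ∨ j = c then bc0 + 1 else bc0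
        let bc2 := if i = b ∨ i = c then bc1 + 1 else bc1
        let bc3 := if k = a ∨ k = b then bc2 + 1 else bc2
        if sc3 = strike ∧ bc3 = ball then
          if prev_list.length = 0 ∨ [i, j, k] ∈ prev_list then acc ++ [[i, j, k]]
          else acc
        else acc
      else acc) = acc ++ pvBodyA a b c strike ball prev_list i j k := by
    intro i j acc k
    unfold pvBodyA
    dsimp only
    split_ifs <;> simp
  have h2 : ∀ (i : Int) (acc : List (List Int)) (j : Int),
      ((PySem.List.pyRange 1 10 1).foldl (fun pl3 k =>
        if i ≠ j ∧ j ≠ k ∧ k ≠ i then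
          let sc0 : Int := 0
          let bc0 : Int := 0
          let sc1 := if i = a then sc0 + 1 else sc0
          let sc2 := if j = b then sc1 + 1 else sc1
          let sc3 := if k = c then sc2 + 1 else sc2
          let bc1 := if j = a ∨ j = c then bc0 + 1 else bc0
          let bc2 := if i = b ∨ i = c then bc1 + 1 else bc1
          let bc3 := if k = a ∨ k = b then bc2 + 1 else bc2
          if sc3 = strike ∧ bc3 = ball then
            if prev_list.length = 0 ∨ [i, j, k] ∈ prev_list then pl3 ++ [[i, j, k]]
            else pl3
          else pl3
        else pl3) acc) =
      acc ++ (PySem.List.pyRange 1 10 1).flatMap (fun k => pvBodyA a b c strike ball prev_list i j k) := by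
    intro i acc j
    exact pv_foldl_eq_flatMap _ _ (fun acc k => h3 i j acc k) _ acc
  have h1 : ∀ (acc : List (List Int)) (i : Int),
      ((PySem.List.pyRange 1 10 1).foldl (fun pl2 j =>
        (PySem.List.pyRange 1 10 1).foldl (fun pl3 k =>
          if i ≠ j ∧ j ≠ k ∧ k ≠ i then
            let sc0 : Int := 0
            let bc0 : Int := 0
            let sc1 := if i = a then sc0 + 1 else sc0
            let sc2 := if j = b then sc1 + 1 else sc1
            let sc3 := if k = c then sc2 + 1 else sc2
            let bc1 := if j = a ∨ j = c then bc0 + 1 else bc0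
            let bc2 := if i = b ∨ i = c then bc1 + 1 else bc1
            let bc3 := if k = a ∨ k = b then bc2 + 1 else bc2
            if sc3 = strike ∧ bc3 = ball then
              if prev_list.length = 0 ∨ [i, j, k] ∈ prev_list then pl3 ++ [[i, j, k]]
              else pl3
            else pl3
          else pl3) pl2) acc) =
      acc ++ (PySem.List.pyRange 1 10 1).flatMap (fun j =>
        (PySem.List.pyRange 1 10 1).flatMap (fun k => pvBodyA a b c strike ball prev_list i j k)) := by
    intro acc i
    exact pv_foldl_eq_flatMap _ _ (fun acc j => h2 i acc j) _ acc
  unfold possible_num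
  rw [pv_foldl_eq_flatMap _ _ (fun acc i => h1 acc i) _ []]
  simp

theorem pv_B_flat (a b c strike ball : Int) (prev_list : List (List Int)) :
    possible_num_alt a b c strike ball prev_list =
      (pvPerms (PySem.List.pyRange 1 10 1) 3).flatMap (pvGB a b c strike ball prev_list) := by
  have h : ∀ (acc : List (List Int)) (t : List Int),
      (match t with
      | [i, j, k] =>
        let s : Int := (if i = a then 1 else 0) + (if j = b then 1 else 0) + (if k = c then 1 else 0)
        let bl : Int := (if j = a ∨ j = c then 1 else 0) + (if i = b ∨ i = c then 1 else 0) +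
                        (if k = a ∨ k = b then 1 else 0)
        if s = strike ∧ bl = ball ∧ (prev_list.length = 0 ∨ [i, j, k] ∈ prev_list) then
          acc ++ [[i, j, k]]
        else acc
      | _ => acc) = acc ++ pvGB a b c strike ball prev_list t := by
    intro acc t
    match t with
    | [] => simp [pvGB]
    | [i] => simp [pvGB]
    | [i, j] => simp [pvGB]
    | [i, j, k] => unfold pvGB; dsimp only; split_ifs <;> simp
    | i :: j :: k :: m :: r => simp [pvGB]
  unfold possible_num_alt
  rw [pv_foldl_eq_flatMap _ _ h _ []]
  simp

-- ===== VERDICT (by name: the statement is the Claim_ definition above) =====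
theorem possible_num_spec : Claim_equal_possible_num := by
  intro a b c strike ball prev_list _
  unfold Spec_possible_num
  rw [pv_A_flat, pv_B_flat, pv_range_eq, pv_perms_eq, ← pv_pull]
  simp only [pv_body_eq]
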